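-- pv_equiv track=rewrite | github.com/Jinu0107/2020_Algorithm | algorithm_6.py | solution
-- ===== SOURCE A (Python) =====
-- def solution(a, b):
--     answer = 0
--     if a == b:
--         return a
--     elif a > b:
--         for i in range(b, a+1):
--             answer += i
--     else:
--         for i in range(a, b+1):
--             answer += i
--
--     return answer
-- ===== SOURCE B (Python) =====
-- def solution(a, b):
--     lo, hi = (a, b) if a <= b else (b, a)
--     return (hi - lo + 1) * (lo + hi) // 2
-- ===== Notes on version B (the rewrite author's own statement) =====
-- stated objective: faster
-- what changed: Replaced the O(|a-b|) summation loop with the closed-form arithmetic-series formula (hi-lo+1)*(lo+hi)//2.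
import Mathlib
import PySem

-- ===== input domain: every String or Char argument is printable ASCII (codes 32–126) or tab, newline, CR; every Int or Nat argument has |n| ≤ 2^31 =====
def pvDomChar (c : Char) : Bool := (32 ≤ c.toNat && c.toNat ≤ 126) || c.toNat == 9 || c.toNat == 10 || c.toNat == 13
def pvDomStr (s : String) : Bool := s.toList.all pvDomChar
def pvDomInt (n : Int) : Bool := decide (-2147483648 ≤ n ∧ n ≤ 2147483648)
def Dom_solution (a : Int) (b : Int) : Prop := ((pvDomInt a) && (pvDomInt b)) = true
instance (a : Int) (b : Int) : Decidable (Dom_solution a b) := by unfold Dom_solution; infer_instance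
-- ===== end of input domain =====

-- B replaces A's O(|a-b|) summation loop with the closed-form arithmetic-series formula (faster).

-- ===== PORT A =====
def solution (a : Int) (b : Int) : Int :=
  let answer : Int := 0
  if a == b then a
  else if a > b then
    (PySem.List.pyRange b (a + 1) 1).foldl (fun acc i => acc + i) answer
  else
    (PySem.List.pyRange a (b + 1) 1).foldl (fun acc i => acc + i) answer

-- ===== PORT B =====
def solution_alt (a : Int) (b : Int) : Int :=
  let p := if a ≤ b then (a, b) else (b, a)
  PySem.Int.floordiv ((p.2 - p.1 + 1) * (p.1 + p.2)) 2

-- ===== PRECONDITION & SPEC =====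
def Spec_solution (a : Int) (b : Int) (out : Int) : Prop := out = solution_alt a b
instance (a : Int) (b : Int) (out : Int) : Decidable (Spec_solution a b out) := by unfold Spec_solution; infer_instance

-- ===== CLAIM (what is proved, stated in full; the proofs are below) =====
def Claim_equal_solution : Prop := ∀ (a : Int) (b : Int), Dom_solution a b → Spec_solution a b (solution a b)

-- ===== LEMMAS AND PROOFS =====

-- twice the loop's sum over range(a, a+n) equals n*(2a+n-1)
theorem pv_twice_sum (a : Int) : ∀ n : Nat,
    2 * ((PySem.List.pyRange a (a + n) 1).foldl (fun acc i => acc + i) 0) = n * (2 * a + n - 1) := by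
  intro n
  induction n with
  | zero => simp [PySem.List.pyRange_one_eq_nil]
  | succ n ih =>
    have h : (a + (n + 1 : Nat)) = (a + n) + 1 := by push_cast; ring
    rw [h, PySem.List.pyRange_one_succ_right (by omega), List.foldl_append]
    simp only [List.foldl_cons, List.foldl_nil]
    push_cast
    push_cast at ih
    linear_combination ih

theorem pv_loop_eq (lo hi : Int) (h : lo ≤ hi) :
    (PySem.List.pyRange lo (hi + 1) 1).foldl (fun acc i => acc + i) 0 =
    PySem.Int.floordiv ((hi - lo + 1) * (lo + hi)) 2 := by
  have hn : hi + 1 = lo + ((hi + 1 - lo).toNat : Int) := by omega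
  have h2 := pv_twice_sum lo (hi + 1 - lo).toNat
  rw [← hn] at h2
  have hc : (((hi + 1 - lo).toNat : Int)) = hi + 1 - lo := by omega
  rw [hc] at h2
  have hprod : (hi - lo + 1) * (lo + hi) =
      2 * ((PySem.List.pyRange lo (hi + 1) 1).foldl (fun acc i => acc + i) 0) := by
    linear_combination -h2
  rw [PySem.Int.floordiv_eq_ediv_of_pos (by norm_num), hprod]
  omega

-- ===== VERDICT (by name: the statement is the Claim_ definition above) =====
theorem solution_spec : Claim_equal_solution := by
  intro a b _
  unfold Spec_solution solution solution_alt
  by_cases hab : a = b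
  · subst hab
    simp only [BEq.rfl, if_true, le_refl]
    rw [PySem.Int.floordiv_eq_ediv_of_pos (by norm_num)]
    have h : (a - a + 1) * (a + a) = 2 * a := by ring
    rw [h]; omega
  · simp only [beq_iff_eq, hab, if_false]
    by_cases hgt : a > b
    · rw [if_pos hgt, if_neg (by omega), pv_loop_eq b a (le_of_lt hgt)]
    · rw [if_neg hgt, if_pos (by omega), pv_loop_eq a b (by omega)]
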